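-- pv_equiv track=rewrite | github.com/haolunc/ARC-RL | reference_solutions/solutions/feca6190.py | transform
-- ===== SOURCE A (Python) =====
-- def transform(input_grid):
--
--     v = input_grid[0]
--     L = len(v)
--
--     k = sum(1 for x in v if x != 0)
--
--     N = L * k
--
--     out = [[0 for _ in range(N)] for _ in range(N)]
--
--     for r in range(N):
--         c_start = N - 1 - r
--         for i, val in enumerate(v):
--             c = c_start + i
--             if 0 <= c < N:
--                 out[r][c] = val
--
--     return out
-- ===== SOURCE B (Python) =====
-- def transform(input_grid):
--     v = input_grid[0]
--     L = len(v)
--     k = sum(1 for x in v if x != 0)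
--     N = L * k
--     # per-anti-diagonal lookup: out[r][c] depends only on s = r + c
--     diag = [v[s - (N - 1)] if 0 <= s - (N - 1) < L else 0
--             for s in range(2 * N - 1)]
--     return [[diag[r + c] for c in range(N)] for r in range(N)]
-- ===== Notes on version B (the rewrite author's own statement) =====
-- stated objective: alternative
-- what changed: B replaces A's build-zero-grid-then-mutate-by-row placement loop with a precomputed per-anti-diagonal lookup table diag (out[r][c] = diag[r+c]) and builds the grid by pure comprehension.
import Mathlib
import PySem

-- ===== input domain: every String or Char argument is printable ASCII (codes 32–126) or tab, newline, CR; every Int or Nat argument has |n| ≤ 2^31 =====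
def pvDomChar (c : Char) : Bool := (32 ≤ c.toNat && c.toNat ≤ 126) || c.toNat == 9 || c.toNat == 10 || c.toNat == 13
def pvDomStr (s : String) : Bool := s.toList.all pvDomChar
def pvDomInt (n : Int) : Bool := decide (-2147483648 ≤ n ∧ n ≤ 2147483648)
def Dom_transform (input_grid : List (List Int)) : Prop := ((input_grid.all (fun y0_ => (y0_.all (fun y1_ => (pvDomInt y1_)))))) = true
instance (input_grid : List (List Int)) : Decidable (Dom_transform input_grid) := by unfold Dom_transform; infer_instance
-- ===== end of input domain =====

-- B replaces A's mutate-rows placement loop with a per-anti-diagonal lookup table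
-- (out[r][c] = diag[r+c]) built once; alternative decomposition, same asymptotic cost.

-- ===== PORT A =====
def transform (input_grid : List (List Int)) : List (List Int) :=
  let v := (PySem.List.pyGet? input_grid 0).getD []
  let L := v.length
  let k := v.countP (fun x => decide (x ≠ 0))
  let N := L * k
  let out0 := (List.range N).map (fun _ => (List.range N).map (fun _ => (0 : Int)))
  (List.range N).foldl (fun out (r : Nat) =>
    let cs : Int := (N : Int) - 1 - (r : Int)
    (PySem.List.enumerate v 0).foldl (fun out p =>
      let c := cs + p.1
      if 0 ≤ c ∧ c < (N : Int) then out.modify r (fun row => row.set c.toNat p.2) else out)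
      out) out0

-- ===== PORT B =====
def transform_alt (input_grid : List (List Int)) : List (List Int) :=
  let v := (PySem.List.pyGet? input_grid 0).getD []
  let L := v.length
  let k := v.countP (fun x => decide (x ≠ 0))
  let N := L * k
  let diag := (PySem.List.pyRange 0 (2 * (N : Int) - 1) 1).map (fun s =>
    let t := s - ((N : Int) - 1)
    if 0 ≤ t ∧ t < (L : Int) then PySem.List.pyGetD v t 0 else 0)
  (List.range N).map (fun (r : Nat) => (List.range N).map (fun (c : Nat) =>
    PySem.List.pyGetD diag ((r : Int) + (c : Int)) 0))

-- ===== PRECONDITION & SPEC =====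
-- Pre_ excludes exactly the empty outer list, on which A raises IndexError at input_grid[0].
def Pre_transform (input_grid : List (List Int)) : Prop := input_grid ≠ []
instance (input_grid : List (List Int)) : Decidable (Pre_transform input_grid) := by
  unfold Pre_transform; infer_instance
def pvWitness_transform : List (List Int) := [[1, 0]]
def Spec_transform (input_grid : List (List Int)) (out : List (List Int)) : Prop := out = transform_alt input_grid
instance (input_grid : List (List Int)) (out : List (List Int)) : Decidable (Spec_transform input_grid out) := by unfold Spec_transform; infer_instance

-- ===== CLAIM (what is proved, stated in full; the proofs are below) =====
def Claim_equal_transform : Prop := ∀ (input_grid : List (List Int)), Dom_transform input_grid → Pre_transform input_grid → Spec_transform input_grid (transform input_grid)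

-- ===== LEMMAS AND PROOFS =====

theorem pv_modify_modify {α : Type} (l : List α) (r : Nat) (f g : α → α) :
    (l.modify r f).modify r g = l.modify r (fun x => g (f x)) := by
  apply List.ext_getElem?
  intro j
  simp only [List.getElem?_modify]
  cases l[j]? with
  | none => simp
  | some a =>
    simp
    split <;> simp

-- the inner placement loop only mutates row r: it factors through List.modify
theorem pv_rowstep (NN : Int) (w : List (Int × Int)) (r : Nat) (cs : Int) :
    ∀ (g : List (List Int)),
    w.foldl (fun out p => if 0 ≤ cs + p.1 ∧ cs + p.1 < NN then
        out.modify r (fun row => row.set (cs + p.1).toNat p.2) else out) g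
      = g.modify r (fun row => w.foldl (fun row p => if 0 ≤ cs + p.1 ∧ cs + p.1 < NN then
          row.set (cs + p.1).toNat p.2 else row) row) := by
  induction w with
  | nil => intro g; exact (List.modify_id r g).symm
  | cons p w ih =>
    intro g
    simp only [List.foldl_cons]
    rw [ih]
    by_cases h : 0 ≤ cs + p.1 ∧ cs + p.1 < NN
    · simp only [if_pos h, pv_modify_modify]
    · simp only [if_neg h]

-- a fold of row-wise modifies over range n, read back at index i
theorem pv_foldl_range_modify {α : Type} (h : Nat → α → α) :
    ∀ (n : Nat) (g : List α) (i : Nat),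
      ((List.range n).foldl (fun out r => out.modify r (h r)) g)[i]?
        = if i < n then (g[i]?).map (h i) else g[i]? := by
  intro n
  induction n with
  | zero => intro g i; simp
  | succ n ih =>
    intro g i
    rw [List.range_succ, List.foldl_append]
    simp only [List.foldl_cons, List.foldl_nil]
    rw [List.getElem?_modify, ih]
    by_cases h1 : i < n
    · have h2 : n ≠ i := by omega
      have h3 : i < n + 1 := by omega
      simp [h1, h2, h3]
    · by_cases h2 : n = i
      · subst h2
        simp
      · have h3 : ¬ i < n + 1 := by omega
        simp [h1, h2, h3]

theorem pv_inner_len (NN : Int) (cs : Int) (w : List (Int × Int)) :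
    ∀ (row : List Int),
      (w.foldl (fun row p => if 0 ≤ cs + p.1 ∧ cs + p.1 < NN then
          row.set (cs + p.1).toNat p.2 else row) row).length = row.length := by
  induction w with
  | nil => intro row; rfl
  | cons p w ih =>
    intro row
    simp only [List.foldl_cons]
    rw [ih]
    split <;> simp

-- reading one cell of the inner placement loop over enumerate
theorem pv_inner_get (NN : Int) (w : List Int) :
    ∀ (s cs : Int) (row : List Int) (j : Nat),
      (j : Int) < NN → NN ≤ (row.length : Int) →
      ((PySem.List.enumerate w s).foldl
          (fun row p => if 0 ≤ cs + p.1 ∧ cs + p.1 < NN then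
            row.set (cs + p.1).toNat p.2 else row) row)[j]?
        = if cs + s ≤ (j : Int) ∧ (j : Int) < cs + s + w.length then
            w[((j : Int) - (cs + s)).toNat]? else row[j]? := by
  induction w with
  | nil =>
    intro s cs row j hj hrow
    simp [PySem.List.enumerate]
  | cons x w ih =>
    intro s cs row j hj hrow
    rw [PySem.List.enumerate_cons]
    simp only [List.foldl_cons]
    have hlen' : NN ≤ ((if 0 ≤ cs + s ∧ cs + s < NN then row.set (cs + s).toNat x else row).length : Int) := by
      split
      · simp only [List.length_set]; exact hrow
      · exact hrow
    rw [ih (s + 1) cs _ j hj hlen']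
    simp only [List.length_cons]
    push_cast
    by_cases hA : cs + s + 1 ≤ (j : Int) ∧ (j : Int) < cs + s + 1 + w.length
    · have hc1 : cs + (s + 1) ≤ (j : Int) ∧ (j : Int) < cs + (s + 1) + w.length := by
        constructor <;> omega
      rw [if_pos hc1, if_pos (show cs + s ≤ (j : Int) ∧ (j : Int) < cs + s + ((w.length : Int) + 1) by constructor <;> omega)]
      have hidx : ((j : Int) - (cs + s)).toNat = ((j : Int) - (cs + (s + 1))).toNat + 1 := by omega
      rw [hidx, List.getElem?_cons_succ]
    · have hc1 : ¬ (cs + (s + 1) ≤ (j : Int) ∧ (j : Int) < cs + (s + 1) + w.length) := by omega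
      rw [if_neg hc1]
      by_cases hB : cs + s ≤ (j : Int) ∧ (j : Int) < cs + s + ((w.length : Int) + 1)
      · -- j = cs + s : the head element lands here
        have hj_eq : (j : Int) = cs + s := by omega
        have hg : 0 ≤ cs + s ∧ cs + s < NN := by constructor <;> omega
        rw [if_pos hg, if_pos hB]
        have hidx : ((j : Int) - (cs + s)).toNat = 0 := by omega
        rw [hidx, List.getElem?_cons_zero, List.getElem?_set]
        have h1 : (cs + s).toNat = j := by omega
        have h2 : j < row.length := by omega
        simp [h1, h2]
      · rw [if_neg hB]
        split
        · next hg =>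
          rw [List.getElem?_set_ne]
          omega
        · rfl

theorem transform_main (v : List Int) (rest : List (List Int)) :
    transform (v :: rest) = transform_alt (v :: rest) := by
  have hv : (PySem.List.pyGet? (v :: rest) 0).getD [] = v := by
    simp [PySem.List.pyGet?, PySem.List.pyIdx?]
  unfold transform transform_alt
  rw [hv]
  simp only []
  generalize (v.length * List.countP (fun x => decide (x ≠ 0)) v) = n
  simp only [pv_rowstep]
  apply List.ext_getElem?
  intro i
  rw [pv_foldl_range_modify]
  by_cases hi : i < n
  · rw [if_pos hi]
    simp only [List.getElem?_map, List.getElem?_range hi, Option.map_some]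
    congr 1
    apply List.ext_getElem?
    intro c
    by_cases hc : c < n
    · rw [pv_inner_get (n : Int) v 0 ((n : Int) - 1 - (i : Int)) _ c (by exact_mod_cast hc)
        (by simp)]
      rw [List.getElem?_map, List.getElem?_range hc, Option.map_some]
      rw [List.getElem?_map, List.getElem?_range hc, Option.map_some]
      rw [PySem.List.pyGetD_map_pyRange_of_nonneg
        (fun s => if 0 ≤ s - ((n : Int) - 1) ∧ s - ((n : Int) - 1) < (v.length : Int) then
          PySem.List.pyGetD v (s - ((n : Int) - 1)) 0 else 0)
        (2 * (n : Int) - 1) ((i : Int) + (c : Int)) 0 (by omega) (by omega)]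
      split_ifs with h1 h2 h2
      · -- both in the band
        have ht : 0 ≤ (i : Int) + (c : Int) - ((n : Int) - 1) ∧
            (i : Int) + (c : Int) - ((n : Int) - 1) < (v.length : Int) := by
          constructor <;> omega
        rw [PySem.List.pyGetD_of_nonneg v 0 ht.1]
        have hlt : ((i : Int) + (c : Int) - ((n : Int) - 1)).toNat < v.length := by omega
        rw [List.getD_eq_getElem _ _ hlt]
        rw [List.getElem?_eq_getElem (by omega : ((c : Int) - ((n : Int) - 1 - (i : Int) + 0)).toNat < v.length)]
        have hidx : ((c : Int) - ((n : Int) - 1 - (i : Int) + 0)).toNat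
            = ((i : Int) + (c : Int) - ((n : Int) - 1)).toNat := by omega
        simp only [add_zero] at hidx ⊢
        simp [hidx]
      · exact absurd h2 (by omega)
      · exact absurd h1 (by omega)
      · rfl
    · have hc' : n ≤ c := Nat.le_of_not_lt hc
      rw [List.getElem?_eq_none (by rw [pv_inner_len]; simp [hc']),
          List.getElem?_eq_none (by simp [hc'])]
  · rw [if_neg hi]
    have hi' : n ≤ i := Nat.le_of_not_lt hi
    rw [List.getElem?_eq_none (by simp [hi']), List.getElem?_eq_none (by simp [hi'])]

-- ===== VERDICT (by name: the statement is the Claim_ definition above) =====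
theorem transform_spec : Claim_equal_transform := by
  intro g _ hpre
  unfold Spec_transform
  match g, hpre with
  | v :: rest, _ => exact transform_main v rest
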